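-- pv_equiv track=rewrite | github.com/berox455/kb3b_prog | game of chicken/thegame.py | kiwi
-- ===== SOURCE A (Python) =====
-- def kiwi(hist, my_moves, opp_moves):
--     d = 0
--     h = 0
--
--     if opp_moves == []:
--         return "H"
--     elif len(my_moves) < 3200:
--         for i in opp_moves:
--             if i == "H":
--                 h += 1
--             else:
--                 d += 1
--
--         if opp_moves[0] == "D":
--             if opp_moves[-1] == "D":
--                 Zlej = 30
--                 Hodnej = 35
--             else:
--                 Zlej = 15
--                 Hodnej = 50
--         elif opp_moves[0] == "H":
--             if opp_moves[-1] == "H":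
--                 Zlej = 0
--                 Hodnej = 65
--             else:
--                 Zlej = 15
--                 Hodnej = 50
--         else:
--             Zlej = 0
--             Hodnej = 65
--
--         if h <= d:
--             Zlej += 35
--         else:
--             Hodnej += 35
--
--         if Zlej > Hodnej:
--             return "H"
--         else:
--             return "D"
--     else:
--         return "D"
-- ===== SOURCE B (Python) =====
-- def _balance(ms):
--     # divide-and-conquer cancellation: (# of "H") minus (# of non-"H")
--     if not ms:
--         return 0
--     if len(ms) == 1:
--         return 1 if ms[0] == "H" else -1
--     mid = len(ms) // 2
--     return _balance(ms[:mid]) + _balance(ms[mid:])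
--
--
-- def kiwi(hist, my_moves, opp_moves):
--     if not opp_moves:
--         return "H"
--     if len(my_moves) >= 3200:
--         return "D"
--     if opp_moves[0] != "D" or opp_moves[-1] != "D":
--         return "D"
--     return "H" if _balance(opp_moves) <= 0 else "D"
-- ===== Notes on version B (the rewrite author's own statement) =====
-- stated objective: alternative
-- what changed: Replaced the h/d accumulator loop plus Zlej/Hodnej score table by guard clauses and a divide-and-conquer cancellation balance (#'H' minus #non-'H' computed by recursive halving): 'H' iff the opponent opened and closed with 'D' and the balance is nonpositive.
import Mathlib
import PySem

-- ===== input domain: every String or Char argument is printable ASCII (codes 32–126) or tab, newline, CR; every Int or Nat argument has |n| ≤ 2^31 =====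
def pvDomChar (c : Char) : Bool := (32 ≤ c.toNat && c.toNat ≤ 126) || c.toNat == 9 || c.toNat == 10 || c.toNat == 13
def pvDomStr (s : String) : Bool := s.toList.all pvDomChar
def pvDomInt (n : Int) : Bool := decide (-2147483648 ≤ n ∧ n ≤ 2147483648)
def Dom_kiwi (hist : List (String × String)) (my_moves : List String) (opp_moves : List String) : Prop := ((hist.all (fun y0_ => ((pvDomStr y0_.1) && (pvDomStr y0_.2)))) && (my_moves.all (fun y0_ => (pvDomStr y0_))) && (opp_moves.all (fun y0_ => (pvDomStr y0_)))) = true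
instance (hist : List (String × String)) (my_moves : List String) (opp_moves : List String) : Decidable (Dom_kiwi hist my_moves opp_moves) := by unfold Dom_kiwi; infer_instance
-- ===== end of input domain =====

-- B replaces A's h/d accumulator loop and Zlej/Hodnej score table by guard clauses
-- and a divide-and-conquer cancellation balance (alternative decomposition; return value only).

-- ===== PORT A =====
def kiwi (hist : List (String × String)) (my_moves : List String) (opp_moves : List String) : String :=
  if opp_moves == [] then "H"
  else if my_moves.length < 3200 then
    -- counting loop: h counts "H", everything else goes to d
    let hd : Int × Int :=
      opp_moves.foldl (fun p i => if i == "H" then (p.1 + 1, p.2) else (p.1, p.2 + 1)) (0, 0)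
    let h := hd.1
    let d := hd.2
    -- opp_moves[0] / opp_moves[-1]; the "" defaults are unreachable (list nonempty)
    let first := (PySem.List.pyGet? opp_moves 0).getD ""
    let last := (PySem.List.pyGet? opp_moves (-1)).getD ""
    let zh : Int × Int :=
      if first == "D" then
        if last == "D" then (30, 35) else (15, 50)
      else if first == "H" then
        if last == "H" then (0, 65) else (15, 50)
      else (0, 65)
    let zh2 : Int × Int := if h ≤ d then (zh.1 + 35, zh.2) else (zh.1, zh.2 + 35)
    if zh2.1 > zh2.2 then "H" else "D"
  else "D"

-- ===== PORT B =====
-- _balance from Source B: divide-and-conquer cancellation, (# "H") - (# non-"H")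
def pvBalance : List String → Int
  | [] => 0
  | [m] => if m == "H" then 1 else -1
  | m :: m' :: ms =>
    let l := m :: m' :: ms
    pvBalance (l.take (l.length / 2)) + pvBalance (l.drop (l.length / 2))
termination_by l => l.length
decreasing_by
  · simp; omega
  · simp; omega

def kiwi_alt (hist : List (String × String)) (my_moves : List String) (opp_moves : List String) : String :=
  if opp_moves == [] then "H"
  else if 3200 ≤ my_moves.length then "D"
  else if !((PySem.List.pyGet? opp_moves 0).getD "" == "D")
        || !((PySem.List.pyGet? opp_moves (-1)).getD "" == "D") then "D"
  else if pvBalance opp_moves ≤ 0 then "H" else "D"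

-- ===== PRECONDITION & SPEC =====
def Spec_kiwi (hist : List (String × String)) (my_moves : List String) (opp_moves : List String) (out : String) : Prop := out = kiwi_alt hist my_moves opp_moves
instance (hist : List (String × String)) (my_moves : List String) (opp_moves : List String) (out : String) : Decidable (Spec_kiwi hist my_moves opp_moves out) := by unfold Spec_kiwi; infer_instance

-- ===== CLAIM (what is proved, stated in full; the proofs are below) =====
def Claim_equal_kiwi : Prop := ∀ (hist : List (String × String)) (my_moves : List String) (opp_moves : List String), Dom_kiwi hist my_moves opp_moves → Spec_kiwi hist my_moves opp_moves (kiwi hist my_moves opp_moves)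

-- ===== LEMMAS AND PROOFS =====

-- A's counting loop yields (count "H", length - count "H")
theorem kiwi_fold_count (l : List String) (a b : Int) :
    l.foldl (fun p i => if i == "H" then (p.1 + 1, p.2) else (p.1, p.2 + 1)) (a, b)
      = (a + (List.count "H" l : Int), b + ((l.length : Int) - (List.count "H" l : Int))) := by
  induction l generalizing a b with
  | nil => simp
  | cons x xs ih =>
    simp only [List.foldl_cons]
    by_cases hx : x == "H"
    · rw [if_pos hx, ih]
      have hxe : x = "H" := eq_of_beq hx
      simp only [List.count_cons, hxe, Prod.mk.injEq, List.length_cons]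
      constructor <;> (simp; try omega)
    · rw [if_neg hx, ih]
      have hxe : ¬ x = "H" := fun h => hx (by simp [h])
      simp only [List.count_cons, Prod.mk.injEq, List.length_cons]
      constructor <;> (simp [hxe]; try omega)

-- the divide-and-conquer balance equals 2*count("H") - length
theorem pvBalance_eq (l : List String) :
    pvBalance l = 2 * (List.count "H" l : Int) - (l.length : Int) := by
  induction l using pvBalance.induct with
  | case1 => simp [pvBalance]
  | case2 m hm =>
    have : m = "H" := eq_of_beq hm
    simp [pvBalance, this]
  | case3 m hm =>
    have : ¬ m = "H" := fun h => hm (by simp [h])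
    simp [pvBalance, this]
  | case4 m m' ms l ih1 ih2 =>
    simp only [pvBalance]
    simp only [show l = m :: m' :: ms from rfl] at ih1 ih2 ⊢
    rw [ih1, ih2]
    have hc : List.count "H" ((m :: m' :: ms).take ((m :: m' :: ms).length / 2))
        + List.count "H" ((m :: m' :: ms).drop ((m :: m' :: ms).length / 2))
        = List.count "H" (m :: m' :: ms) := by
      rw [← List.count_append, List.take_append_drop]
    have hl : ((m :: m' :: ms).take ((m :: m' :: ms).length / 2)).length
        + ((m :: m' :: ms).drop ((m :: m' :: ms).length / 2)).length
        = (m :: m' :: ms).length := by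
      rw [← List.length_append, List.take_append_drop]
    omega

-- ===== VERDICT (by name: the statement is the Claim_ definition above) =====
theorem kiwi_spec : Claim_equal_kiwi := by
  intro hist my_moves opp_moves _
  unfold Spec_kiwi kiwi kiwi_alt
  by_cases he : opp_moves == []
  · simp [he]
  · simp only [he, Bool.false_eq_true, if_false]
    by_cases hm : my_moves.length < 3200
    · have hm2 : ¬ (3200 ≤ my_moves.length) := by omega
      simp only [hm, if_true, hm2, if_false]
      rw [kiwi_fold_count, pvBalance_eq]
      set c : Int := (List.count "H" opp_moves : Int) with hc_def
      set n : Int := (opp_moves.length : Int) with hn_def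
      set f := (PySem.List.pyGet? opp_moves 0).getD ""
      set g := (PySem.List.pyGet? opp_moves (-1)).getD ""
      by_cases hc : c ≤ n - c
      · have h2c : 2 * c - n ≤ 0 := by omega
        by_cases hf : f == "D" <;> by_cases hg : g == "D" <;>
          by_cases hfh : f == "H" <;> by_cases hgh : g == "H" <;>
            simp [hf, hg, hfh, hgh, hc, h2c]
      · have h2c : ¬ (2 * c - n ≤ 0) := by omega
        by_cases hf : f == "D" <;> by_cases hg : g == "D" <;>
          by_cases hfh : f == "H" <;> by_cases hgh : g == "H" <;>
            simp [hf, hg, hfh, hgh, hc, h2c]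
    · have hm2 : (3200 ≤ my_moves.length) := by omega
      simp [hm, hm2]
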